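-- pv_equiv track=rewrite | github.com/hellolilly-labs/catalog-maintenance | src/research/customer_cultural_research.py | _identify_cultural_themes
-- ===== SOURCE A (Python) =====
-- from typing import Dict, Any, List, Optional
--
-- def _identify_cultural_themes(products: List[Dict[str, Any]]) -> List[str]:
--     """Identify cultural themes from product patterns"""
--     themes = []
--
--     # Analyze product names for cultural themes
--     all_names = [p.get('name', '').lower() for p in products]
--     name_text = ' '.join(all_names)
--
--     if 'therminal' in name_text:
--         themes.append("Climate-Adaptive Performance")
--     if 'deflect' in name_text:
--         themes.append("Protection-Focused Design")
--     if any(term in name_text for term in ['women', 'wmn']):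
--         themes.append("Gender-Inclusive Design")
--     if any(term in name_text for term in ['alpha', 'pro', 'expert']):
--         themes.append("Performance Hierarchy Culture")
--
--     return themes
-- ===== SOURCE B (Python) =====
-- from typing import Dict, Any, List
--
-- _THEME_TABLE = [
--     ("Climate-Adaptive Performance", ["therminal"]),
--     ("Protection-Focused Design", ["deflect"]),
--     ("Gender-Inclusive Design", ["women", "wmn"]),
--     ("Performance Hierarchy Culture", ["alpha", "pro", "expert"]),
-- ]
--
-- def _identify_cultural_themes(products: List[Dict[str, Any]]) -> List[str]:
--     """Identify cultural themes per product, against a theme/keyword table."""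
--     found = set()
--     for p in products:
--         name = p.get('name', '').lower()
--         for label, keywords in _THEME_TABLE:
--             if label not in found and any(kw in name for kw in keywords):
--                 found.add(label)
--     return [label for label, _ in _THEME_TABLE if label in found]
-- ===== Notes on version B (the rewrite author's own statement) =====
-- stated objective: alternative
-- what changed: B replaces A's 'join all lowered names into one big text, then substring-test each hard-coded keyword on it' with a theme/keyword table scanned per product: each name is lowered once and checked against the still-unmatched themes, a found-set is maintained, and the output is emitted in table order.
import Mathlib
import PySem

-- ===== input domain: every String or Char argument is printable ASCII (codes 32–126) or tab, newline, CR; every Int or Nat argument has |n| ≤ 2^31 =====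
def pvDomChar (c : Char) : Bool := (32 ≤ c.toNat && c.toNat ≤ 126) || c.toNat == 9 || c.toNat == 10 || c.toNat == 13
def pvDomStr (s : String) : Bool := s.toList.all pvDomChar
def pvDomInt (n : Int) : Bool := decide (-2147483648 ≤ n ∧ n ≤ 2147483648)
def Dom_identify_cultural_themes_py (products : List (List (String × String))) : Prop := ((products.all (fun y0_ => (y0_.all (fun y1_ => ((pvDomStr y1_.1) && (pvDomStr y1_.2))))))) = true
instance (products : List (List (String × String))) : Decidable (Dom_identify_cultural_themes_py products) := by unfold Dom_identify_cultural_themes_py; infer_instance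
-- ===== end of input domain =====

-- B replaces A's "join all lowered names into one text, then test each keyword on it" by a
-- per-product scan over a theme/keyword table maintaining a found-set (objective: alternative decomposition).

-- ===== PORT A =====
def identify_cultural_themes_py (products : List (List (String × String))) : List String :=
  let all_names := products.map (fun p => PySem.Str.lower ((PySem.Dict.mk p).getD "name" ""))
  let name_text := PySem.Str.join " " all_names
  let themes : List String := []
  let themes := if PySem.Str.isIn "therminal" name_text then themes ++ ["Climate-Adaptive Performance"] else themes
  let themes := if PySem.Str.isIn "deflect" name_text then themes ++ ["Protection-Focused Design"] else themes
  let themes := if (["women", "wmn"].any fun term => PySem.Str.isIn term name_text) then themes ++ ["Gender-Inclusive Design"] else themes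
  let themes := if (["alpha", "pro", "expert"].any fun term => PySem.Str.isIn term name_text) then themes ++ ["Performance Hierarchy Culture"] else themes
  themes

-- ===== PORT B =====
def pvThemeTable : List (String × List String) :=
  [("Climate-Adaptive Performance", ["therminal"]),
   ("Protection-Focused Design", ["deflect"]),
   ("Gender-Inclusive Design", ["women", "wmn"]),
   ("Performance Hierarchy Culture", ["alpha", "pro", "expert"])]

def identify_cultural_themes_py_alt (products : List (List (String × String))) : List String :=
  let found : PySem.Set String := products.foldl (fun found p =>
    let name := PySem.Str.lower ((PySem.Dict.mk p).getD "name" "")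
    pvThemeTable.foldl (fun found t =>
      if !(found.contains t.1) && t.2.any (fun kw => PySem.Str.isIn kw name) then found.add t.1
      else found) found) PySem.Set.empty
  (pvThemeTable.filter (fun t => found.contains t.1)).map Prod.fst

-- ===== PRECONDITION & SPEC =====
def Spec_identify_cultural_themes_py (products : List (List (String × String))) (out : List String) : Prop := out = identify_cultural_themes_py_alt products
instance (products : List (List (String × String))) (out : List String) : Decidable (Spec_identify_cultural_themes_py products out) := by unfold Spec_identify_cultural_themes_py; infer_instance

-- ===== CLAIM (what is proved, stated in full; the proofs are below) =====
def Claim_equal_identify_cultural_themes_py : Prop := ∀ (products : List (List (String × String))), Dom_identify_cultural_themes_py products → Spec_identify_cultural_themes_py products (identify_cultural_themes_py products)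

-- ===== LEMMAS AND PROOFS =====

-- the lowered name of a product, shared canonical form
def pvLowName (p : List (String × String)) : String :=
  PySem.Str.lower ((PySem.Dict.mk p).getD "name" "")

-- canonical value both ports are reduced to
def pvCanon (products : List (List (String × String))) : List String :=
  (pvThemeTable.filter (fun t =>
    products.any (fun p => t.2.any (fun kw => PySem.Str.isIn kw (pvLowName p))))).map Prod.fst

-- a prefix of a ++ c :: b that avoids c is a prefix of a; an infix of it avoiding c lies inside a or b
lemma pv_prefix_split {c : Char} : ∀ {sub : List Char} (a : List Char) {b : List Char}, sub <+: a ++ c :: b → c ∉ sub → sub <+: a := by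
  intro sub
  induction sub with
  | nil => intro a b _ _; exact List.nil_prefix
  | cons s0 s' ih =>
    intro a b h hc
    cases a with
    | nil =>
      rw [List.nil_append, List.cons_prefix_cons] at h
      exact absurd (h.1 ▸ List.mem_cons_self) hc
    | cons x a' =>
      rw [List.cons_append, List.cons_prefix_cons] at h
      exact List.cons_prefix_cons.mpr ⟨h.1, ih a' h.2 (fun hm => hc (List.mem_cons_of_mem _ hm))⟩

lemma pv_infix_split {c : Char} {sub b : List Char} :
    ∀ a, sub <:+: a ++ c :: b → c ∉ sub → sub <:+: a ∨ sub <:+: b := by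
  intro a
  induction a with
  | nil =>
    intro h hc
    rw [List.nil_append, List.infix_cons_iff] at h
    rcases h with h | h
    · exact Or.inl (pv_prefix_split [] (by simpa using h) hc).isInfix
    · exact Or.inr h
  | cons x a' ih =>
    intro h hc
    rw [List.cons_append, List.infix_cons_iff] at h
    rcases h with h | h
    · exact Or.inl (pv_prefix_split (x :: a') h hc).isInfix
    · rcases ih h hc with h' | h'
      · exact Or.inl (List.infix_cons h')
      · exact Or.inr h'

-- a separator-free nonempty pattern is an infix of the join iff it is an infix of some part
lemma pv_infix_join {c : Char} {sub : List Char} (hc : c ∉ sub) (hne : sub ≠ []) :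
    ∀ parts : List (List Char), (sub <:+: PySem.Chars.join [c] parts ↔ ∃ p ∈ parts, sub <:+: p) := by
  intro parts
  induction parts with
  | nil => simp [PySem.Chars.join_nil, List.infix_nil, hne]
  | cons p rest ih =>
    cases rest with
    | nil => simp [PySem.Chars.join_singleton]
    | cons q rest' =>
      rw [PySem.Chars.join_cons_cons]
      constructor
      · intro h
        have h' : sub <:+: p ++ c :: PySem.Chars.join [c] (q :: rest') := by
          simpa [List.append_assoc] using h
        rcases pv_infix_split p h' hc with h1 | h1
        · exact ⟨p, List.mem_cons_self, h1⟩
        · rcases ih.mp h1 with ⟨r, hr, h2⟩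
          exact ⟨r, List.mem_cons_of_mem _ hr, h2⟩
      · rintro ⟨r, hr, h2⟩
        rcases List.mem_cons.mp hr with rfl | hr'
        · exact h2.trans ((List.prefix_append _ _).trans (List.prefix_append _ _)).isInfix
        · exact (ih.mpr ⟨r, hr', h2⟩).trans (List.suffix_append _ _).isInfix

-- 'kw in " ".join(names)' = any per-name test, for a space-free nonempty keyword
lemma pv_isIn_join (kw : String) (names : List String)
    (hc : ' ' ∉ kw.toList) (hne : kw.toList ≠ []) :
    PySem.Str.isIn kw (PySem.Str.join " " names) = names.any (fun n => PySem.Str.isIn kw n) := by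
  rw [Bool.eq_iff_iff, PySem.Str.isIn_iff_infix, PySem.Str.toList_join]
  have h1 : (" " : String).toList = [' '] := rfl
  rw [h1, pv_infix_join hc hne]
  simp [List.any_eq_true, PySem.Chars.isIn_iff_infix]

lemma pv_any_comm {α β : Type} (l : List α) (m : List β) (g : α → β → Bool) :
    (l.any fun a => m.any (g a)) = (m.any fun b => l.any fun a => g a b) := by
  rw [Bool.eq_iff_iff]
  simp only [List.any_eq_true]
  exact ⟨fun ⟨a, ha, b, hb, h⟩ => ⟨b, hb, a, ha, h⟩, fun ⟨b, hb, a, ha, h⟩ => ⟨a, ha, b, hb, h⟩⟩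

-- membership after the inner (per-product) table scan
lemma pv_mem_inner (nm : String) :
    ∀ (tbl : List (String × List String)) (f : PySem.Set String) (l : String),
      l ∈ tbl.foldl (fun found t =>
        if !(found.contains t.1) && t.2.any (fun kw => PySem.Str.isIn kw nm) then found.add t.1
        else found) f
      ↔ l ∈ f ∨ ∃ t ∈ tbl, t.1 = l ∧ t.2.any (fun kw => PySem.Str.isIn kw nm) = true := by
  intro tbl
  induction tbl with
  | nil => simp
  | cons t rest ih =>
    intro f l
    rw [List.foldl_cons, ih]
    by_cases hcont : f.contains t.1 = true
    · have hmem : t.1 ∈ f := (PySem.Set.contains_iff f t.1).mp hcont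
      simp only [hcont, Bool.not_true, Bool.false_and, List.mem_cons]
      constructor
      · rintro (h | h)
        · exact Or.inl h
        · rcases h with ⟨t', ht', h⟩; exact Or.inr ⟨t', Or.inr ht', h⟩
      · rintro (h | ⟨t', ht', h⟩)
        · exact Or.inl h
        · rcases ht' with rfl | ht'
          · exact Or.inl (h.1 ▸ hmem)
          · exact Or.inr ⟨t', ht', h⟩
    · by_cases hany : t.2.any (fun kw => PySem.Str.isIn kw nm) = true
      · simp only [hcont, hany, Bool.not_false, Bool.and_true, if_true, PySem.Set.mem_add,
          List.mem_cons]
        constructor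
        · rintro ((h | rfl) | ⟨t', ht', h⟩)
          · exact Or.inl h
          · exact Or.inr ⟨t, Or.inl rfl, rfl, hany⟩
          · exact Or.inr ⟨t', Or.inr ht', h⟩
        · rintro (h | ⟨t', ht', h⟩)
          · exact Or.inl (Or.inl h)
          · rcases ht' with rfl | ht'
            · exact Or.inl (Or.inr h.1.symm)
            · exact Or.inr ⟨t', ht', h⟩
      · simp only [Bool.not_eq_true] at hcont hany
        have hcond : (!(f.contains t.1) && t.2.any (fun kw => PySem.Str.isIn kw nm)) = false := by
          rw [hcont, hany]; simp
        simp only [hcond, Bool.false_eq_true, if_false, List.mem_cons]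
        constructor
        · rintro (h | ⟨t', ht', h⟩)
          · exact Or.inl h
          · exact Or.inr ⟨t', Or.inr ht', h⟩
        · rintro (h | ⟨t', ht', h⟩)
          · exact Or.inl h
          · rcases ht' with rfl | ht'
            · exact absurd h.2 (by rw [hany]; simp)
            · exact Or.inr ⟨t', ht', h⟩

-- membership in the final found-set
lemma pv_mem_found (products : List (List (String × String))) (l : String) :
    ∀ f : PySem.Set String,
      l ∈ products.foldl (fun found p =>
        let name := PySem.Str.lower ((PySem.Dict.mk p).getD "name" "")
        pvThemeTable.foldl (fun found t =>
          if !(found.contains t.1) && t.2.any (fun kw => PySem.Str.isIn kw name) then found.add t.1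
          else found) found) f
      ↔ l ∈ f ∨ ∃ p ∈ products, ∃ t ∈ pvThemeTable, t.1 = l ∧
          t.2.any (fun kw => PySem.Str.isIn kw (pvLowName p)) = true := by
  induction products with
  | nil => intro f; simp
  | cons p rest ih =>
    intro f
    simp only [List.foldl_cons]
    rw [ih, pv_mem_inner]
    simp only [pvLowName, List.mem_cons]
    constructor
    · rintro ((h | ⟨t, ht, h⟩) | ⟨p', hp', h⟩)
      · exact Or.inl h
      · exact Or.inr ⟨p, Or.inl rfl, t, ht, h⟩
      · exact Or.inr ⟨p', Or.inr hp', h⟩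
    · rintro (h | ⟨p', hp', h⟩)
      · exact Or.inl (Or.inl h)
      · rcases hp' with rfl | hp'
        · exact Or.inl (Or.inr h)
        · exact Or.inr ⟨p', hp', h⟩

lemma pv_B_canon (products : List (List (String × String))) :
    identify_cultural_themes_py_alt products = pvCanon products := by
  unfold identify_cultural_themes_py_alt pvCanon
  refine congrArg (List.map Prod.fst) (List.filter_congr ?_)
  intro t ht
  rw [Bool.eq_iff_iff, PySem.Set.contains_iff, pv_mem_found, List.any_eq_true]
  simp only [pvThemeTable, List.mem_cons, List.not_mem_nil, or_false] at ht ⊢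
  constructor
  · rintro (h | ⟨p, hp, t', ht', h1, h2⟩)
    · exact absurd h (by simp [PySem.Set.empty])
    · refine ⟨p, hp, ?_⟩
      rcases ht with rfl | rfl | rfl | rfl <;> rcases ht' with rfl | rfl | rfl | rfl <;>
        first
          | exact absurd h1 (by decide)
          | exact h2
  · rintro ⟨p, hp, h2⟩
    exact Or.inr ⟨p, hp, t, ht, rfl, h2⟩

lemma pv_any_congr {α : Type} (l : List α) (p q : α → Bool) (h : ∀ x ∈ l, p x = q x) :
    l.any p = l.any q := by
  induction l with
  | nil => rfl
  | cons x xs ih =>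
    simp only [List.any_cons, h x List.mem_cons_self,
      ih (fun y hy => h y (List.mem_cons_of_mem _ hy))]

lemma pv_A_canon (products : List (List (String × String))) :
    identify_cultural_themes_py products = pvCanon products := by
  have hx : ∀ kw : String, ' ' ∉ kw.toList → kw.toList ≠ [] →
      PySem.Str.isIn kw (PySem.Str.join " " (products.map
        (fun p => PySem.Str.lower ((PySem.Dict.mk p).getD "name" "")))) =
        products.any (fun p => PySem.Str.isIn kw (pvLowName p)) := by
    intro kw h1 h2
    rw [pv_isIn_join kw _ h1 h2, List.any_map]
    rfl
  have hcond : ∀ kws : List String, (∀ kw ∈ kws, ' ' ∉ kw.toList ∧ kw.toList ≠ []) →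
      (kws.any fun term => PySem.Str.isIn term (PySem.Str.join " " (products.map
        (fun p => PySem.Str.lower ((PySem.Dict.mk p).getD "name" ""))))) =
      products.any (fun p => kws.any (fun kw => PySem.Str.isIn kw (pvLowName p))) := by
    intro kws hk
    rw [pv_any_congr kws _ _ (fun kw h => hx kw (hk kw h).1 (hk kw h).2)]
    exact pv_any_comm kws products (fun kw p => PySem.Str.isIn kw (pvLowName p))
  unfold identify_cultural_themes_py pvCanon pvThemeTable
  simp only [List.filter_cons, List.filter_nil, List.nil_append,
    hx "therminal" (by decide) (by decide), hx "deflect" (by decide) (by decide),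
    hcond ["women", "wmn"] (by decide), hcond ["alpha", "pro", "expert"] (by decide),
    List.any_cons, List.any_nil, Bool.or_false]
  cases products.any (fun p => PySem.Str.isIn "therminal" (pvLowName p)) <;>
    cases products.any (fun p => PySem.Str.isIn "deflect" (pvLowName p)) <;>
      cases products.any (fun p => PySem.Str.isIn "women" (pvLowName p) ||
          PySem.Str.isIn "wmn" (pvLowName p)) <;>
        cases products.any (fun p => PySem.Str.isIn "alpha" (pvLowName p) ||
            (PySem.Str.isIn "pro" (pvLowName p) || PySem.Str.isIn "expert" (pvLowName p))) <;>
          simp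

-- ===== VERDICT (by name: the statement is the Claim_ definition above) =====
theorem identify_cultural_themes_py_spec : Claim_equal_identify_cultural_themes_py := by
  intro products _
  unfold Spec_identify_cultural_themes_py
  rw [pv_A_canon, pv_B_canon]
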